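-- pv_equiv track=rewrite | github.com/dbizzaro/WFOMC-beyond-FOL | experiments_solutions.py | solution_connected_graphs_d_edges
-- ===== SOURCE A (Python) =====
-- def solution_connected_graphs_d_edges(n, d):
--   #https://oeis.org/A062734
--   solutions = [1, 0, 1, 0, 0, 3, 1, 0, 0, 0, 16, 15, 6, 1, 0, 0, 0, 0, 125, 222, 205,
--                120, 45, 10, 1, 0, 0, 0, 0, 0, 1296, 3660, 5700, 6165, 4945, 2997, 1365,
--                455, 105, 15, 1, 0, 0, 0, 0, 0, 0, 16807, 68295, 156555, 258125, 331506,
--                343140, 290745, 202755, 116175, 54257, 20349]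
--   sum_ = 0
--   for n_prime in range(1, n):
--     sum_ += n_prime * (n_prime-1) //2  +1
--   return solutions[sum_ + d]
-- ===== SOURCE B (Python) =====
-- def solution_connected_graphs_d_edges(n, d):
--   # same data as https://oeis.org/A062734, organized by number of nodes
--   row1 = [1]
--   row2 = [0, 1]
--   row3 = [0, 0, 3, 1]
--   row4 = [0, 0, 0, 16, 15, 6, 1]
--   row5 = [0, 0, 0, 0, 125, 222, 205, 120, 45, 10, 1]
--   row6 = [0, 0, 0, 0, 0, 1296, 3660, 5700, 6165, 4945, 2997, 1365, 455, 105, 15, 1]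
--   row7 = [0, 0, 0, 0, 0, 0, 16807, 68295, 156555, 258125, 331506, 343140,
--           290745, 202755, 116175, 54257, 20349]
--   flat = row1 + row2 + row3 + row4 + row5 + row6 + row7
--   # closed form for the row-start offset: (n-1)*(n*n - 2*n + 6)//6 = C(n,3) + (n-1)
--   offset = (n - 1) * (n * n - 2 * n + 6) // 6 if n >= 1 else 0
--   return flat[offset + d]
-- ===== Notes on version B (the rewrite author's own statement) =====
-- stated objective: faster
-- what changed: B stores the table as per-node rows concatenated into the flat list and replaces A's O(n) accumulation loop by the closed-form offset (n-1)*(n*n-2*n+6)//6 (= C(n,3)+(n-1)), empty-sum 0 for n<1.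
import Mathlib
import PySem

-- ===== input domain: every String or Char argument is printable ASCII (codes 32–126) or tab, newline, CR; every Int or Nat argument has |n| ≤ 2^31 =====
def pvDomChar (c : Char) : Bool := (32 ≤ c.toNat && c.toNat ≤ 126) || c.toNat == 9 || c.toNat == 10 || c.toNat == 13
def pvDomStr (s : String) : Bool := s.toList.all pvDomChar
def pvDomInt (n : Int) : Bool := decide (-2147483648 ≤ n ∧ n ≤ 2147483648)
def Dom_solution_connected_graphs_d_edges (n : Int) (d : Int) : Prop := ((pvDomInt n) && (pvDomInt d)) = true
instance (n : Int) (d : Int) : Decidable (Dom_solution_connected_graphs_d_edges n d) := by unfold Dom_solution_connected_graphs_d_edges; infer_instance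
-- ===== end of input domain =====

-- B stores the table as per-node rows concatenated into the flat list and replaces A's O(n)
-- accumulation loop by the closed-form offset (n-1)*(n*n-2*n+6)//6 (empty-sum 0 for n < 1).

-- ===== PORT A =====
def solution_connected_graphs_d_edges (n : Int) (d : Int) : Int :=
  let solutions : List Int :=
    [1, 0, 1, 0, 0, 3, 1, 0, 0, 0, 16, 15, 6, 1, 0, 0, 0, 0, 125, 222, 205,
     120, 45, 10, 1, 0, 0, 0, 0, 0, 1296, 3660, 5700, 6165, 4945, 2997, 1365,
     455, 105, 15, 1, 0, 0, 0, 0, 0, 0, 16807, 68295, 156555, 258125, 331506,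
     343140, 290745, 202755, 116175, 54257, 20349]
  let sum_ : Int :=
    (PySem.List.pyRange 1 n 1).foldl
      (fun s n_prime => s + (PySem.Int.floordiv (n_prime * (n_prime - 1)) 2 + 1)) 0
  ((PySem.List.pyGet? solutions (sum_ + d)).getD 0)

-- ===== PORT B =====
def pvRow1 : List Int := [1]
def pvRow2 : List Int := [0, 1]
def pvRow3 : List Int := [0, 0, 3, 1]
def pvRow4 : List Int := [0, 0, 0, 16, 15, 6, 1]
def pvRow5 : List Int := [0, 0, 0, 0, 125, 222, 205, 120, 45, 10, 1]
def pvRow6 : List Int := [0, 0, 0, 0, 0, 1296, 3660, 5700, 6165, 4945, 2997, 1365, 455, 105, 15, 1]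
def pvRow7 : List Int := [0, 0, 0, 0, 0, 0, 16807, 68295, 156555, 258125, 331506, 343140,
                          290745, 202755, 116175, 54257, 20349]

def solution_connected_graphs_d_edges_alt (n : Int) (d : Int) : Int :=
  let flat : List Int := pvRow1 ++ pvRow2 ++ pvRow3 ++ pvRow4 ++ pvRow5 ++ pvRow6 ++ pvRow7
  let offset : Int :=
    if 1 ≤ n then PySem.Int.floordiv ((n - 1) * (n * n - 2 * n + 6)) 6 else 0
  ((PySem.List.pyGet? flat (offset + d)).getD 0)

-- ===== PRECONDITION & SPEC =====
-- Pre_ excludes exactly the inputs where Python's list indexing raises IndexError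
-- (the flat index offset + d outside [-58, 58) for the 58-entry table).
def Pre_solution_connected_graphs_d_edges (n : Int) (d : Int) : Prop :=
  PySem.Raise.InRange 58
    ((if 1 ≤ n then PySem.Int.floordiv ((n - 1) * (n * n - 2 * n + 6)) 6 else 0) + d)
instance (n : Int) (d : Int) : Decidable (Pre_solution_connected_graphs_d_edges n d) := by unfold Pre_solution_connected_graphs_d_edges; infer_instance
def pvWitness_solution_connected_graphs_d_edges : Int × Int := (4, 3)

def Spec_solution_connected_graphs_d_edges (n : Int) (d : Int) (out : Int) : Prop := out = solution_connected_graphs_d_edges_alt n d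
instance (n : Int) (d : Int) (out : Int) : Decidable (Spec_solution_connected_graphs_d_edges n d out) := by unfold Spec_solution_connected_graphs_d_edges; infer_instance

-- ===== CLAIM (what is proved, stated in full; the proofs are below) =====
def Claim_equal_solution_connected_graphs_d_edges : Prop := ∀ (n : Int) (d : Int), Dom_solution_connected_graphs_d_edges n d → Pre_solution_connected_graphs_d_edges n d → Spec_solution_connected_graphs_d_edges n d (solution_connected_graphs_d_edges n d)

-- ===== LEMMAS AND PROOFS =====

-- A's loop sum, scaled by 6, equals the cubic polynomial (exactly; no division involved).
lemma pvLoop_mul_six (m : Nat) (hm : 1 ≤ m) :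
    ((PySem.List.pyRange 1 (m : Int) 1).foldl
      (fun s k => s + (PySem.Int.floordiv (k * (k - 1)) 2 + 1)) 0) * 6
    = ((m : Int) - 1) * ((m : Int) * (m : Int) - 2 * (m : Int) + 6) := by
  induction m with
  | zero => omega
  | succ m ih =>
    by_cases h1 : 1 ≤ m
    · have hstep : PySem.List.pyRange 1 ((m : Int) + 1) 1
          = PySem.List.pyRange 1 (m : Int) 1 ++ [(m : Int)] :=
        PySem.List.pyRange_one_succ_right (by exact_mod_cast h1)
      have hdvd : (2 : Int) ∣ (m : Int) * ((m : Int) - 1) := by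
        rcases Int.even_or_odd (m : Int) with he | ho
        · exact Dvd.dvd.mul_right he.two_dvd _
        · obtain ⟨k, hk⟩ := ho
          exact Dvd.dvd.mul_left ⟨k, by omega⟩ _
      obtain ⟨t, ht⟩ := hdvd
      have hfd : PySem.Int.floordiv ((m : Int) * ((m : Int) - 1)) 2 = t := by
        rw [PySem.Int.floordiv_eq_iff_of_pos (by norm_num)]
        constructor <;> nlinarith [sq_nonneg ((m : Int) - 1)]
      have ih' := ih h1
      push_cast
      rw [hstep, List.foldl_append]
      simp only [List.foldl_cons, List.foldl_nil, hfd]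
      push_cast at ih'
      nlinarith [ih']
    · have hm0 : m = 0 := by omega
      subst hm0
      simp

-- for n ≤ 0 the range is empty
lemma pvLoop_nonpos (n : Int) (hn : n < 1) :
    (PySem.List.pyRange 1 n 1).foldl
      (fun s k => s + (PySem.Int.floordiv (k * (k - 1)) 2 + 1)) 0 = 0 := by
  rw [PySem.List.pyRange_one_eq_nil (by omega : n ≤ 1)]
  rfl

-- A's loop sum equals B's closed-form offset, for every n
lemma pvLoop_eq_offset (n : Int) :
    (PySem.List.pyRange 1 n 1).foldl
      (fun s k => s + (PySem.Int.floordiv (k * (k - 1)) 2 + 1)) 0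
    = (if 1 ≤ n then PySem.Int.floordiv ((n - 1) * (n * n - 2 * n + 6)) 6 else 0) := by
  by_cases h : 1 ≤ n
  · obtain ⟨m, rfl⟩ : ∃ m : Nat, n = (m : Int) := ⟨n.toNat, by omega⟩
    have hm : 1 ≤ m := by exact_mod_cast h
    have h6 := pvLoop_mul_six m hm
    have hfd : PySem.Int.floordiv (((m : Int) - 1) * ((m : Int) * (m : Int) - 2 * (m : Int) + 6)) 6
        = (PySem.List.pyRange 1 (m : Int) 1).foldl
            (fun s k => s + (PySem.Int.floordiv (k * (k - 1)) 2 + 1)) 0 := by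
      rw [PySem.Int.floordiv_eq_iff_of_pos (by norm_num)]
      constructor <;> nlinarith [h6]
    rw [if_pos h, hfd]
  · rw [if_neg h, pvLoop_nonpos n (by omega)]

-- B's concatenated rows are exactly A's flat table
lemma pvFlat_eq :
    pvRow1 ++ pvRow2 ++ pvRow3 ++ pvRow4 ++ pvRow5 ++ pvRow6 ++ pvRow7
    = ([1, 0, 1, 0, 0, 3, 1, 0, 0, 0, 16, 15, 6, 1, 0, 0, 0, 0, 125, 222, 205,
        120, 45, 10, 1, 0, 0, 0, 0, 0, 1296, 3660, 5700, 6165, 4945, 2997, 1365,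
        455, 105, 15, 1, 0, 0, 0, 0, 0, 0, 16807, 68295, 156555, 258125, 331506,
        343140, 290745, 202755, 116175, 54257, 20349] : List Int) := by
  decide

-- ===== VERDICT (by name: the statement is the Claim_ definition above) =====
theorem solution_connected_graphs_d_edges_spec : Claim_equal_solution_connected_graphs_d_edges := by
  intro n d _ _
  unfold Spec_solution_connected_graphs_d_edges
  unfold solution_connected_graphs_d_edges solution_connected_graphs_d_edges_alt
  rw [pvLoop_eq_offset, pvFlat_eq]
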